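-- pv_equiv track=rewrite | github.com/antonio-raian/EXA869-2019.1 | Semantico/Programa.py | tipoExpressao
-- ===== SOURCE A (Python) =====
-- def tipoExpressao(tokens):
--     tipo_expressao = ['nada']
--     pos = 0
--
--     for token in tokens:
--         [linha, tipo, valor] = token
--         if(tipo == 'IDE' and tipo_expressao[pos] == 'nada'):
--             tipo_expressao[pos] = 'var'
--         elif(tipo == 'ARI'):
--             tipo_expressao[pos] = 'ari'
--         elif(tipo == 'LOG'):
--             tipo_expressao[pos] = 'log'
--             pos = pos + 1
--             tipo_expressao.append('nada')
--         elif(tipo == 'REL'):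
--             tipo_expressao[pos] = 'log'
--         elif(tipo == 'NRO' and tipo_expressao[pos] == 'nada'):
--             tipo_expressao[pos] = 'num'
--
--     return tipo_expressao
-- ===== SOURCE B (Python) =====
-- def tipoExpressao(tokens):
--     # Two phases: split at LOG tokens, then classify only the final group.
--     # Every LOG-terminated group contributes a fixed 'log'; only the tail group's
--     # content matters.
--     n_log = 0
--     last_group = []
--     for linha, tipo, valor in tokens:
--         if tipo == 'LOG':
--             n_log += 1
--             last_group = []
--         else:
--             last_group.append(tipo)
--     return ['log'] * n_log + [_classify(last_group)]
--
--
-- def _classify(tipos):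
--     res = 'nada'
--     for tipo in tipos:
--         if tipo == 'ARI':
--             res = 'ari'
--         elif tipo == 'REL':
--             res = 'log'
--         elif tipo == 'IDE' and res == 'nada':
--             res = 'var'
--         elif tipo == 'NRO' and res == 'nada':
--             res = 'num'
--     return res
-- ===== Notes on version B (the rewrite author's own statement) =====
-- stated objective: simpler
-- what changed: Replaces A's mutable result list with a moving write index by a two-phase decomposition: one pass counts LOG-delimited groups (each finished group is always 'log') and collects only the final group's token kinds, which a separate helper classifies; the answer is ['log']*n_log plus that classification.
-- outside the precondition, e.g. on tipoExpressao([['1', 'IDE']]): A raises ValueError, B raises ValueError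
import Mathlib
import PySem

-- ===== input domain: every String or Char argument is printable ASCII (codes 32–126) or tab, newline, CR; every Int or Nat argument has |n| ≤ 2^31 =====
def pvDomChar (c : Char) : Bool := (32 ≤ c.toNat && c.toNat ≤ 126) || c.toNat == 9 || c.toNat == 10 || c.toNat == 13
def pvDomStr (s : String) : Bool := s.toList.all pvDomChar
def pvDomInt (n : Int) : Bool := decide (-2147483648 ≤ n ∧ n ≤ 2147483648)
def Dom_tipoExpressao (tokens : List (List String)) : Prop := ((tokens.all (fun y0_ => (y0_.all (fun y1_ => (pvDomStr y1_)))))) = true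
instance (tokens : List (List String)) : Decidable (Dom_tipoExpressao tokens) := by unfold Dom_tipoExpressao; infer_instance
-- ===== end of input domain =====

-- B replaces A's mutable list + moving index with a two-phase decomposition:
-- count LOG-terminated groups (each is always 'log') and classify only the final
-- group; objective: simpler. (Return-value equivalence; neither mutates input.)

-- ===== PORT A =====
-- step of A's loop; state = (tipo_expressao, pos). pos is always tipo_expressao.length - 1,
-- so the reads `tipo_expressao[pos]` / writes are exact via getD/set (never out of range).
-- A malformed token (length ≠ 3) raises ValueError in Python: excluded by Pre_ below.
def pvStepA (st : List String × Nat) (token : List String) : List String × Nat :=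
  match token with
  | [_, tipo, _] =>
    let te := st.1
    let pos := st.2
    if tipo = "IDE" ∧ te.getD pos "" = "nada" then (te.set pos "var", pos)
    else if tipo = "ARI" then (te.set pos "ari", pos)
    else if tipo = "LOG" then ((te.set pos "log") ++ ["nada"], pos + 1)
    else if tipo = "REL" then (te.set pos "log", pos)
    else if tipo = "NRO" ∧ te.getD pos "" = "nada" then (te.set pos "num", pos)
    else (te, pos)
  | _ => st  -- unreachable under Pre_ (Python raises here)

def tipoExpressao (tokens : List (List String)) : List String :=
  (tokens.foldl pvStepA (["nada"], 0)).1

-- ===== PORT B =====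
-- `_classify` loop body
def pvCstep (res : String) (tipo : String) : String :=
  if tipo = "ARI" then "ari"
  else if tipo = "REL" then "log"
  else if tipo = "IDE" ∧ res = "nada" then "var"
  else if tipo = "NRO" ∧ res = "nada" then "num"
  else res

def pvClassify (tipos : List String) : String :=
  tipos.foldl pvCstep "nada"

-- grouping loop body; state = (n_log, last_group)
def pvStepB (st : Nat × List String) (token : List String) : Nat × List String :=
  match token with
  | [_, tipo, _] =>
    if tipo = "LOG" then (st.1 + 1, [])
    else (st.1, st.2 ++ [tipo])
  | _ => st  -- unreachable under Pre_ (Python raises here)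

def tipoExpressao_alt (tokens : List (List String)) : List String :=
  let st := tokens.foldl pvStepB (0, [])
  List.replicate st.1 "log" ++ [pvClassify st.2]

-- ===== PRECONDITION & SPEC =====
-- Pre_ excludes tokens that are not 3-element lists: Python A raises ValueError on unpacking there.
def Pre_tipoExpressao (tokens : List (List String)) : Prop :=
  ∀ token ∈ tokens, token.length = 3

instance (tokens : List (List String)) : Decidable (Pre_tipoExpressao tokens) := by
  unfold Pre_tipoExpressao; infer_instance

def pvWitness_tipoExpressao : List (List String) :=
  [["1", "IDE", "x"], ["1", "ARI", "+"], ["2", "LOG", "&&"], ["2", "NRO", "7"]]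

def Spec_tipoExpressao (tokens : List (List String)) (out : List String) : Prop := out = tipoExpressao_alt tokens
instance (tokens : List (List String)) (out : List String) : Decidable (Spec_tipoExpressao tokens out) := by unfold Spec_tipoExpressao; infer_instance

-- ===== CLAIM (what is proved, stated in full; the proofs are below) =====
def Claim_equal_tipoExpressao : Prop := ∀ (tokens : List (List String)), Dom_tipoExpressao tokens → Pre_tipoExpressao tokens → Spec_tipoExpressao tokens (tipoExpressao tokens)

-- ===== LEMMAS AND PROOFS =====

lemma getD_replicate_append (k : Nat) (c : String) :
    (List.replicate k "log" ++ [c]).getD k "" = c := by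
  induction k with
  | zero => rfl
  | succ k ih => simpa [List.replicate_succ] using ih

lemma set_replicate_append (k : Nat) (c v : String) :
    (List.replicate k "log" ++ [c]).set k v = List.replicate k "log" ++ [v] := by
  induction k with
  | zero => rfl
  | succ k ih => simp [List.replicate_succ, ih]

-- main invariant: from a state of canonical shape, A's fold produces B's answer
lemma classify_append (cur : List String) (t : String) :
    pvClassify (cur ++ [t]) = pvCstep (pvClassify cur) t := by
  simp [pvClassify]

lemma foldl_stepA_eq (tokens : List (List String)) :
    ∀ (k : Nat) (cur : List String),
      (tokens.foldl pvStepA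
        (List.replicate k "log" ++ [pvClassify cur], k)).1
      = (let st := tokens.foldl pvStepB (k, cur)
         List.replicate st.1 "log" ++ [pvClassify st.2]) := by
  induction tokens with
  | nil => intro k cur; rfl
  | cons token rest ih =>
    intro k cur
    match token with
    | [] => simpa [pvStepA, pvStepB] using ih k cur
    | [a] => simpa [pvStepA, pvStepB] using ih k cur
    | [a, b] => simpa [pvStepA, pvStepB] using ih k cur
    | a :: b :: c :: d :: rest' => simpa [pvStepA, pvStepB] using ih k cur
    | [linha, tipo, valor] =>
      simp only [List.foldl_cons, pvStepA, pvStepB,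
        getD_replicate_append]
      by_cases hA : tipo = "ARI"
      · subst hA
        simp only [set_replicate_append, reduceIte, String.reduceEq, and_false, false_and,
          if_false]
        have hv : pvClassify (cur ++ ["ARI"]) = "ari" := by
          simp [classify_append, pvCstep]
        rw [← hv]
        simpa using ih k (cur ++ ["ARI"])
      · by_cases hL : tipo = "LOG"
        · subst hL
          simp only [set_replicate_append, reduceIte, String.reduceEq, and_false, false_and,
            if_false]
          have heq : List.replicate k "log" ++ ["log"] ++ ["nada"]
              = List.replicate (k + 1) "log" ++ [pvClassify ([] : List String)] := by
            simp [List.replicate_succ', pvClassify]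
          rw [heq]
          simpa using ih (k + 1) []
        · by_cases hR : tipo = "REL"
          · subst hR
            simp only [set_replicate_append, reduceIte, String.reduceEq, and_false, false_and,
              if_false]
            have hv : pvClassify (cur ++ ["REL"]) = "log" := by
              simp [classify_append, pvCstep]
            have hih := ih k (cur ++ ["REL"])
            rw [hv] at hih
            simpa using hih
          · by_cases hI : tipo = "IDE" ∧ pvClassify cur = "nada"
            · obtain ⟨ht, hc⟩ := hI
              subst ht
              simp only [hc, set_replicate_append, reduceIte, String.reduceEq, and_self,
                if_true, and_false, false_and, if_false]
              have hv : pvClassify (cur ++ ["IDE"]) = "var" := by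
                simp [classify_append, pvCstep, hc]
              rw [← hv]
              simpa using ih k (cur ++ ["IDE"])
            · by_cases hN : tipo = "NRO" ∧ pvClassify cur = "nada"
              · obtain ⟨ht, hc⟩ := hN
                subst ht
                have hI' : ¬ ("NRO" = "IDE" ∧ pvClassify cur = "nada") := by
                  simp
                simp only [hc, set_replicate_append, reduceIte, String.reduceEq, and_self,
                  if_true, and_false, false_and, if_false, if_neg hI']
                have hv : pvClassify (cur ++ ["NRO"]) = "num" := by
                  simp [classify_append, pvCstep, hc]
                rw [← hv]
                simpa using ih k (cur ++ ["NRO"])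
              · simp only [if_neg hI, if_neg hA, if_neg hL, if_neg hR, if_neg hN]
                have hv : pvClassify (cur ++ [tipo])
                    = pvClassify cur := by
                  rw [classify_append]
                  unfold pvCstep
                  rw [if_neg hA, if_neg hR, if_neg hI, if_neg hN]
                rw [← hv]
                simpa using ih k (cur ++ [tipo])

-- ===== VERDICT (by name: the statement is the Claim_ definition above) =====
theorem tipoExpressao_spec : Claim_equal_tipoExpressao := by
  intro tokens _ _
  unfold Spec_tipoExpressao tipoExpressao tipoExpressao_alt
  have := foldl_stepA_eq tokens 0 []
  simpa [pvClassify] using this
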